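-- pv_equiv track=rewrite | github.com/belovmd/it-academy-python-winter | src/hometask5/IMDB.py | get_bar_chart_by_year
-- ===== SOURCE A (Python) =====
-- def get_bar_chart_by_year(movies):
--     chart = {}
--
--     for line in movies:
--         year = line[line.rfind('(') + 1: line.rfind(')')]
--         chart[year] = chart.get(year, 0) + 1
--
--     sorted_year = list(chart.keys())
--     sorted_year.sort(reverse=False)
--
--     return {year: chart[year] for year in sorted_year}
-- ===== SOURCE B (Python) =====
-- def get_bar_chart_by_year(movies):
--     years = sorted(line[line.rfind('(') + 1: line.rfind(')')] for line in movies)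
--     result = {}
--     n = len(years)
--     k = 0
--     while k < n:
--         year = years[k]
--         run = 1
--         while k + run < n and years[k + run] == year:
--             run += 1
--         result[year] = run
--         k += run
--     return result
-- ===== Notes on version B (the rewrite author's own statement) =====
-- stated objective: alternative
-- what changed: B replaces A's hash-table counting pass followed by a key sort with a sort-then-scan algorithm: it sorts the extracted year substrings first and then run-length-encodes consecutive equal runs with a two-pointer scan, emitting each year with its run length; the output is naturally in sorted year order.
import Mathlib
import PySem

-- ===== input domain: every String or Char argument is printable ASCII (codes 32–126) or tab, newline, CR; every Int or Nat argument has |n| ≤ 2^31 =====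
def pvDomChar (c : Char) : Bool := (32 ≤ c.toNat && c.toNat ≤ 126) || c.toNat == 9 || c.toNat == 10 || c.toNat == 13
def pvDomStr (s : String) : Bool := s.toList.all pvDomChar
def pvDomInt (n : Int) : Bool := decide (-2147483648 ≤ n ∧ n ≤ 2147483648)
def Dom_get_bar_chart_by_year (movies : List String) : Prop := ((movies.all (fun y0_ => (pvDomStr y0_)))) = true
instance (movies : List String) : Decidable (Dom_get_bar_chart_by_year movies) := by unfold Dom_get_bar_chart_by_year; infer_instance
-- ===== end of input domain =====

-- B replaces A's hash-count-then-sort-keys by sort-then-run-length-scan (alternative algorithm); return value only.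

-- shared helper: the expression  line[line.rfind('(') + 1 : line.rfind(')')]  occurring verbatim in both Pythons
def extractYear (line : String) : String :=
  String.ofList (PySem.List.slice line.toList (some (PySem.Str.rfind line "(" + 1)) (some (PySem.Str.rfind line ")")))

-- ===== PORT A =====
def get_bar_chart_by_year (movies : List String) : List (String × Int) :=
  let chart : PySem.Dict String Int :=
    movies.foldl (fun d line =>
      let year := extractYear line
      d.insert year (d.getD year 0 + 1)) PySem.Dict.empty
  let sorted_year := PySem.List.sorted chart.keys (fun y => y) false
  -- dict comprehension over the distinct sorted keys → association list in that order;
  -- chart[year] always succeeds (year ∈ chart.keys), so getD is exact here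
  sorted_year.map (fun year => (year, chart.getD year 0))

-- ===== PORT B =====
-- outer 'while years:' loop of Source B: emit head's run (inner while = the run length), drop the run
def rleLoop : List String → List (String × Int)
  | [] => []
  | year :: rest =>
      let run := (rest.takeWhile (· == year)).length + 1
      (year, (run : Int)) :: rleLoop (rest.dropWhile (· == year))
  termination_by l => l.length
  decreasing_by
    simp only [List.length_cons]
    exact Nat.lt_succ_of_le (List.length_dropWhile_le _ _)

def get_bar_chart_by_year_alt (movies : List String) : List (String × Int) :=
  let years := PySem.List.sorted (movies.map extractYear) (fun y => y) false
  rleLoop years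

-- ===== PRECONDITION & SPEC =====
def Spec_get_bar_chart_by_year (movies : List String) (out : List (String × Int)) : Prop := out = get_bar_chart_by_year_alt movies
instance (movies : List String) (out : List (String × Int)) : Decidable (Spec_get_bar_chart_by_year movies out) := by unfold Spec_get_bar_chart_by_year; infer_instance

-- ===== CLAIM (what is proved, stated in full; the proofs are below) =====
def Claim_equal_get_bar_chart_by_year : Prop := ∀ (movies : List String), Dom_get_bar_chart_by_year movies → Spec_get_bar_chart_by_year movies (get_bar_chart_by_year movies)

-- ===== LEMMAS AND PROOFS =====
lemma chart_eq_counter (movies : List String) :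
    movies.foldl (fun d line =>
      let year := extractYear line
      d.insert year (d.getD year 0 + 1)) PySem.Dict.empty
      = PySem.Dict.counter (movies.map extractYear) := by
  rw [← PySem.Dict.foldl_insert_getD_add_one_eq_counter, List.foldl_map]

lemma ofList_sublist {α : Type} [BEq α] [LawfulBEq α] (xs : List α) : (PySem.Set.ofList xs).Sublist xs := by
  induction xs with
  | nil => simp [PySem.Set.ofList, PySem.Set.empty]
  | cons x t ih =>
      rw [PySem.Set.ofList_cons]
      exact List.Sublist.cons₂ x (List.Sublist.trans List.filter_sublist ih)

-- head of a dropWhile fails the predicate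
lemma dropWhile_head_false {α : Type} (p : α → Bool) (l : List α) {y : α} {ys : List α}
    (h : l.dropWhile p = y :: ys) : p y = false := by
  induction l with
  | nil => simp at h
  | cons a t ih =>
      by_cases hp : p a
      · rw [List.dropWhile_cons_of_pos hp] at h; exact ih h
      · rw [List.dropWhile_cons_of_neg hp] at h
        cases h
        simpa using hp

-- ordered dedup of  x :: (run of x's ++ rest without x)
lemma ofList_run {x : String} (w r : List String) (hwall : ∀ y ∈ w, y = x) (hxnr : x ∉ r) :
    PySem.Set.ofList (x :: (w ++ r)) = x :: PySem.Set.ofList r := by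
  induction w with
  | nil =>
      rw [List.nil_append, PySem.Set.ofList_cons]
      congr 1
      apply List.filter_eq_self.mpr
      intro y hy
      have hyr : y ∈ r := (PySem.Set.mem_ofList _ _).mp hy
      have : y ≠ x := fun h => hxnr (h ▸ hyr)
      simpa using this
  | cons a w' ihw =>
      have ha : a = x := hwall a (by simp)
      subst ha
      have hwall' : ∀ y ∈ w', y = a := fun y hy => hwall y (by simp [hy])
      have hdup : PySem.Set.ofList (a :: a :: (w' ++ r)) = PySem.Set.ofList (a :: (w' ++ r)) := by
        rw [PySem.Set.ofList_cons, PySem.Set.ofList_cons]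
        simp [PySem.Set.discard, List.filter_filter]
      rw [List.cons_append, hdup, ihw hwall']

-- run-length scan of a ≤-sorted list = its ordered dedup paired with counts
lemma rleLoop_sorted (l : List String) (hl : l.Pairwise (· ≤ ·)) :
    rleLoop l = (PySem.Set.ofList l).map (fun y => (y, (l.count y : Int))) := by
  induction l using rleLoop.induct with
  | case1 => simp [rleLoop, PySem.Set.ofList, PySem.Set.empty]
  | case2 x t ih =>
      rcases List.pairwise_cons.mp hl with ⟨hx, ht⟩
      have htw : t.takeWhile (· == x) ++ t.dropWhile (· == x) = t :=
        List.takeWhile_append_dropWhile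
      generalize hw : t.takeWhile (· == x) = w at *
      generalize hr : t.dropWhile (· == x) = r at *
      have hwall : ∀ y ∈ w, y = x := by
        intro y hy
        have hb : (y == x) = true := List.mem_takeWhile_imp (p := (· == x)) (l := t) (hw ▸ hy)
        exact eq_of_beq hb
      have hrne : ∀ y ∈ r, y ≠ x := by
        intro y hy
        rcases hr' : r with _ | ⟨h0, r'⟩
        · rw [hr'] at hy; cases hy
        · have hh0 : h0 ≠ x := by
            have := dropWhile_head_false (· == x) t (hr.trans hr')
            simpa using this
          have hxh0 : x < h0 := lt_of_le_of_ne (hx h0 (by rw [← htw, hr']; simp)) (Ne.symm hh0)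
          rw [hr'] at hy
          rcases List.mem_cons.mp hy with rfl | hy'
          · exact hh0
          · have hrp : (h0 :: r').Pairwise (· ≤ ·) := by
              have : r.Pairwise (· ≤ ·) :=
                hr ▸ List.Pairwise.sublist (List.dropWhile_sublist _) ht
              rwa [hr'] at this
            exact ne_of_gt (lt_of_lt_of_le hxh0 ((List.pairwise_cons.mp hrp).1 y hy'))
      have hxnr : x ∉ r := fun hmem => (hrne x hmem) rfl
      have hrp : r.Pairwise (· ≤ ·) := hr ▸ List.Pairwise.sublist (List.dropWhile_sublist _) ht
      have hcw : w.count x = w.length := List.count_eq_length.mpr (fun b hb => (hwall b hb).symm)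
      have hcr : r.count x = 0 := List.count_eq_zero.mpr hxnr
      rw [rleLoop, hw, hr, ← htw, ofList_run w r hwall hxnr, List.map_cons]
      congr 1
      · have : (x :: (w ++ r)).count x = w.length + 1 := by
          rw [List.count_cons_self, List.count_append, hcw, hcr]
        rw [this]
      · rw [htw, ih hrp]
        apply List.map_congr_left
        intro y hy
        have hyr : y ∈ r := (PySem.Set.mem_ofList _ _).mp hy
        have hyx : y ≠ x := hrne y hyr
        have hcwy : w.count y = 0 := List.count_eq_zero.mpr (fun hm => hyx (hwall y hm))
        have : (x :: (w ++ r)).count y = r.count y := by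
          rw [List.count_cons_of_ne (fun h => hyx h.symm), List.count_append, hcwy, Nat.zero_add]
        rw [← htw, this]

lemma main_eq (ys : List String) :
    (PySem.List.sorted (PySem.Set.ofList ys) (fun y => y) false).map
        (fun y => (y, (ys.count y : Int)))
      = rleLoop (PySem.List.sorted ys (fun y => y) false) := by
  set s := PySem.List.sorted ys (fun y => y) false with hs
  have hperm : s.Perm ys := PySem.List.sorted_perm ys (fun y => y) false
  have hsp : s.Pairwise (· ≤ ·) := PySem.List.sorted_pairwise ys (fun y => y)
  -- sorted (set ys) = set (sorted ys)
  have hkey : PySem.List.sorted (PySem.Set.ofList ys) (fun y => y) = PySem.Set.ofList s := by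
    apply PySem.List.sorted_eq_of_perm_of_pairwise_lt
    · apply (List.perm_ext_iff_of_nodup (PySem.Set.nodup_ofList _) (PySem.Set.nodup_ofList _)).mpr
      intro y
      rw [PySem.Set.mem_ofList, PySem.Set.mem_ofList]
      exact hperm.mem_iff
    · have hle : (PySem.Set.ofList s).Pairwise (· ≤ ·) := List.Pairwise.sublist (ofList_sublist s) hsp
      have hnd : (PySem.Set.ofList s).Nodup := PySem.Set.nodup_ofList s
      exact hle.imp₂ (fun a b hab hne => lt_of_le_of_ne hab hne) hnd
  rw [rleLoop_sorted s hsp, hkey]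
  apply List.map_congr_left
  intro y _
  rw [hperm.count_eq]

-- ===== VERDICT (by name: the statement is the Claim_ definition above) =====
theorem get_bar_chart_by_year_spec : Claim_equal_get_bar_chart_by_year := by
  intro movies _
  show _ = _
  simp only [get_bar_chart_by_year, get_bar_chart_by_year_alt, chart_eq_counter,
    PySem.Dict.keys_counter, PySem.Dict.getD_counter]
  exact main_eq (movies.map extractYear)
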